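-- pv_equiv track=rewrite | github.com/penlu/bespoke-gnn4do | utils/sat_utils.py | detect_dependency_new
-- ===== SOURCE A (Python) =====
-- def detect_dependency_new(clause_small, clause_big):
--     dependence = 0
--     for var in clause_small:
--         if -var in clause_big:
--             return -1
--         elif var in clause_big:
--             dependence = 1
--
--     return dependence
-- ===== SOURCE B (Python) =====
-- def detect_dependency_new(clause_small, clause_big):
--     # Scan the OTHER clause: score each literal of clause_big against set(clause_small)
--     # (2 = conflict, 1 = shared, 0 = unrelated), reduce by max, then a table lookup.
--     small = set(clause_small)
--     m = max((2 if -w in small else 1 if w in small else 0 for w in clause_big), default=0)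
--     return (0, 1, -1)[m]
-- ===== Notes on version B (the rewrite author's own statement) =====
-- stated objective: alternative
-- what changed: Instead of A's stateful early-return scan over clause_small with repeated list membership in clause_big, B scans clause_big once, scores each of its literals against set(clause_small) (2=conflict, 1=shared, 0=none), reduces by max and maps the maximum through a lookup table.
import Mathlib
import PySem

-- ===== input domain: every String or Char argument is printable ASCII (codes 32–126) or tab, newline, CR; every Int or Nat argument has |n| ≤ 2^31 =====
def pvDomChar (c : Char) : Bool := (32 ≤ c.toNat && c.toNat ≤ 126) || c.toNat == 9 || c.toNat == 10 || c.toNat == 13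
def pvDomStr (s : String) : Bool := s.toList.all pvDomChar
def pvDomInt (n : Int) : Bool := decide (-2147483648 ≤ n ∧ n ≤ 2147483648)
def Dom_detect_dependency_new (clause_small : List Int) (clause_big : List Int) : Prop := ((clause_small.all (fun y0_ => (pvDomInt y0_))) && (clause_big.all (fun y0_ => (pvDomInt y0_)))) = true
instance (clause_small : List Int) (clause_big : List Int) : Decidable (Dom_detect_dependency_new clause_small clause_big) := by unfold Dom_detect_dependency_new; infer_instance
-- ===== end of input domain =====

-- B scans clause_big once, scoring each literal against set(clause_small)
-- (2 = conflict, 1 = shared, 0 = none), reduces by max and maps through a table (alternative).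


-- ===== PORT A =====
-- A's loop: scan clause_small, return -1 on a negated hit, set dependence = 1 on a plain hit.
def ddLoopA (clause_big : List Int) : List Int → Int → Int
  | [], dependence => dependence
  | v :: rest, dependence =>
    if clause_big.contains (-v) then -1
    else if clause_big.contains v then ddLoopA clause_big rest 1
    else ddLoopA clause_big rest dependence

def detect_dependency_new (clause_small : List Int) (clause_big : List Int) : Int :=
  ddLoopA clause_big clause_small 0

-- ===== PORT B =====
-- score of one literal of clause_big against set(clause_small)
def ddScore (small : PySem.Set Int) (w : Int) : Nat :=
  if PySem.Set.contains small (-w) then 2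
  else if PySem.Set.contains small w then 1
  else 0

def detect_dependency_new_alt (clause_small : List Int) (clause_big : List Int) : Int :=
  let small := PySem.Set.ofList clause_small
  let m := clause_big.foldl (fun acc w => max acc (ddScore small w)) 0
  -- tuple lookup (0, 1, -1)[m]; the max of scores is always 0, 1 or 2
  match m with
  | 0 => 0
  | 1 => 1
  | _ => -1

-- ===== PRECONDITION & SPEC =====
def Spec_detect_dependency_new (clause_small : List Int) (clause_big : List Int) (out : Int) : Prop := out = detect_dependency_new_alt clause_small clause_big
instance (clause_small : List Int) (clause_big : List Int) (out : Int) : Decidable (Spec_detect_dependency_new clause_small clause_big out) := by unfold Spec_detect_dependency_new; infer_instance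

-- ===== CLAIM (what is proved, stated in full; the proofs are below) =====
def Claim_equal_detect_dependency_new : Prop := ∀ (clause_small : List Int) (clause_big : List Int), Dom_detect_dependency_new clause_small clause_big → Spec_detect_dependency_new clause_small clause_big (detect_dependency_new clause_small clause_big)

-- ===== LEMMAS AND PROOFS =====

-- A's loop result, characterised without the loop.
lemma ddLoopA_char (big : List Int) (s : List Int) (dep : Int) :
    ddLoopA big s dep =
      if ∃ v ∈ s, -v ∈ big then -1
      else if ∃ v ∈ s, v ∈ big then 1 else dep := by
  induction s generalizing dep with
  | nil => simp [ddLoopA]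
  | cons v rest ih =>
    simp only [ddLoopA, List.contains_eq_mem]
    by_cases h1 : -v ∈ big
    · simp [h1]
    · by_cases h2 : v ∈ big
      · rw [ih]
        by_cases hP : ∃ x ∈ rest, -x ∈ big
        · simp [h1, h2, hP]
        · simp [h1, h2, hP]
      · simp [h1, h2, ih]

-- the maximal score over a list of literals, characterised without the fold
lemma ddFold_char (s : List Int) (big : List Int) (a : Nat) :
    big.foldl (fun acc w => max acc (ddScore (PySem.Set.ofList s) w)) a =
      max a (if ∃ w ∈ big, -w ∈ s then 2
             else if ∃ w ∈ big, w ∈ s then 1 else 0) := by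
  induction big generalizing a with
  | nil => simp
  | cons w rest ih =>
    have hc : ∀ x : Int, PySem.Set.contains (PySem.Set.ofList s) x = true ↔ x ∈ s := by
      intro x
      simp [PySem.Set.contains, List.contains_eq_mem, PySem.Set.mem_ofList]
    simp only [List.foldl_cons]
    rw [ih]
    simp only [ddScore]
    by_cases h1 : -w ∈ s <;> by_cases h2 : w ∈ s <;>
      by_cases hr1 : ∃ x ∈ rest, -x ∈ s <;> by_cases hr2 : ∃ x ∈ rest, x ∈ s <;>
      simp [List.exists_mem_cons_iff, hc, h1, h2, hr1, hr2] <;> omega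

-- the two existence conditions are symmetric in the two clauses
lemma neg_mem_comm (s b : List Int) : (∃ v ∈ s, -v ∈ b) ↔ ∃ w ∈ b, -w ∈ s := by
  constructor
  · rintro ⟨v, hv, hb⟩; exact ⟨-v, hb, by simpa using hv⟩
  · rintro ⟨w, hw, hs⟩; exact ⟨-w, hs, by simpa using hw⟩

lemma mem_comm' (s b : List Int) : (∃ v ∈ s, v ∈ b) ↔ ∃ w ∈ b, w ∈ s := by
  constructor
  · rintro ⟨v, hv, hb⟩; exact ⟨v, hb, hv⟩
  · rintro ⟨w, hw, hs⟩; exact ⟨w, hs, hw⟩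

-- ===== VERDICT (by name: the statement is the Claim_ definition above) =====
theorem detect_dependency_new_spec : Claim_equal_detect_dependency_new := by
  intro s b _
  unfold Spec_detect_dependency_new detect_dependency_new detect_dependency_new_alt
  dsimp only
  rw [ddLoopA_char, ddFold_char, Nat.zero_max]
  by_cases h1 : ∃ v ∈ s, -v ∈ b
  · rw [if_pos h1, if_pos ((neg_mem_comm s b).mp h1)]
  · rw [if_neg h1, if_neg (fun h => h1 ((neg_mem_comm s b).mpr h))]
    by_cases h2 : ∃ v ∈ s, v ∈ b
    · rw [if_pos h2, if_pos ((mem_comm' s b).mp h2)]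
    · rw [if_neg h2, if_neg (fun h => h2 ((mem_comm' s b).mpr h))]
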